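-- pv_equiv track=rewrite | github.com/henningward/ProjectEuler | problem_017.py | lengthOfNumber
-- ===== SOURCE A (Python) =====
-- def split_int_to_list(word):
--     listofints = []
--     listofstrings = [char for char in str(word)]
--     for i in range(0, len(listofstrings)):
--         listofints.append(int(listofstrings[i]))
--     return listofints
--
-- def lengthOfNumber(num):
-- 	ones = ["", "one", "two", "three", "four", "five", "six", "seven", "eight", "nine", "ten", "eleven", "twelve", "thirteen", "fourteen", "fifteen", "sixteen", "seventeen", "eighteen", "nineteen"]
--
-- 	tens = ["", "", "twenty", "thirty", "forty", "fifty", "sixty", "seventy", "eighty", "ninety"]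
--
-- 	hundred = "hundred"
--
-- 	thousand = "onethousand"
--
-- 	numList = split_int_to_list(num)
--
-- 	if (num < 20):
-- 		return len(ones[num])
--
-- 	elif (num < 100):
-- 		return len(tens[numList[0]]) + len(ones[numList[1]])
-- 	elif (num < 1000):
-- 		if num%100 == 0:
-- 			return len(ones[numList[0]]) + len(hundred)
-- 		else:
-- 			return len(ones[numList[0]]) + len(hundred) + 3 + lengthOfNumber(int(str(num)[1:]))
-- 	elif (num == 1000):
-- 		return len(thousand)
-- ===== SOURCE B (Python) =====
-- def lengthOfNumber(num):
--     ones = ["", "one", "two", "three", "four", "five", "six", "seven", "eight", "nine", "ten", "eleven", "twelve", "thirteen", "fourteen", "fifteen", "sixteen", "seventeen", "eighteen", "nineteen"]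
--     tens = ["", "", "twenty", "thirty", "forty", "fifty", "sixty", "seventy", "eighty", "ninety"]
--
--     def small(n):  # English fragment for 0..99
--         return ones[n] if n < 20 else tens[n // 10] + ones[n % 10]
--
--     if num < 0 or num > 1000:
--         return None  # out of the function's range
--
--     if num == 1000:
--         s = "onethousand"
--     elif num >= 100:
--         s = ones[num // 100] + "hundred"
--         if num % 100:
--             s = s + "and" + small(num % 100)
--     else:
--         s = small(num)
--     return len(s)
-- ===== Notes on version B (the rewrite author's own statement) =====
-- stated objective: simpler
-- what changed: B extracts digits arithmetically (//, %) and assembles the full English spelling as one concatenated string whose length is returned, replacing A's string-parsed digit list, per-branch length sums and recursive call for the 1-99 remainder.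
import Mathlib
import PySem

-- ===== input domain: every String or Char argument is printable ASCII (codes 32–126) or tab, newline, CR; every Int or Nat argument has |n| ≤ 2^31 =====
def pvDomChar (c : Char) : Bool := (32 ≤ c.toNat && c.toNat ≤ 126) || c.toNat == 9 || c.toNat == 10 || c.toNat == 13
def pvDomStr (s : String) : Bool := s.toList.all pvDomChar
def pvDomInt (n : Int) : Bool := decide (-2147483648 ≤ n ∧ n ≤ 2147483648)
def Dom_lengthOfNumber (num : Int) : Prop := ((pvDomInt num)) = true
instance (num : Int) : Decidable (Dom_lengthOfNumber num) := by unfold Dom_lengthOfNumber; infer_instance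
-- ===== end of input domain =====

-- B builds the whole English spelling by arithmetic digit extraction and takes one length,
-- instead of A's per-branch length sums with string-parsed digits and recursion (objective: simpler).

-- ===== PORT A =====
-- split_int_to_list: digits of str(word), each through int(); none = ValueError (e.g. at '-')
def splitIntToList (word : Int) : Option (List Int) :=
  let listofstrings : List Char := PySem.Int.toChars word
  (List.range listofstrings.length).foldl
    (fun acc i =>
      match acc with
      | none => none
      | some l =>
        match PySem.List.pyGet? listofstrings (i : Int) with
        | none => none  -- IndexError (unreachable: i < length)
        | some c =>
          match PySem.Int.ofChars? [c] with
          | none => none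
          | some d => some (l ++ [d]))
    (some [])

-- recursion ported with a fuel guard only (Python's recursion depth here is at most 2);
-- sentinel 0 stands for Python's ValueError / IndexError / None return, all outside Pre_
def lengthOfNumberFuel : Nat → Int → Int
  | 0, _ => 0
  | Nat.succ f, num =>
    let ones : List String := ["", "one", "two", "three", "four", "five", "six", "seven", "eight", "nine", "ten", "eleven", "twelve", "thirteen", "fourteen", "fifteen", "sixteen", "seventeen", "eighteen", "nineteen"]
    let tens : List String := ["", "", "twenty", "thirty", "forty", "fifty", "sixty", "seventy", "eighty", "ninety"]
    let hundred : String := "hundred"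
    let thousand : String := "onethousand"
    match splitIntToList num with
    | none => 0  -- ValueError in split_int_to_list
    | some numList =>
      if num < 20 then
        match PySem.List.pyGet? ones num with
        | none => 0  -- IndexError
        | some s => PySem.Str.len s
      else if num < 100 then
        match PySem.List.pyGet? numList 0, PySem.List.pyGet? numList 1 with
        | some d0, some d1 =>
          (match PySem.List.pyGet? tens d0 with
           | none => 0 | some s => PySem.Str.len s) +
          (match PySem.List.pyGet? ones d1 with
           | none => 0 | some s => PySem.Str.len s)
        | _, _ => 0  -- IndexError
      else if num < 1000 then
        match PySem.List.pyGet? numList 0 with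
        | none => 0  -- IndexError
        | some d0 =>
          let hd := match PySem.List.pyGet? ones d0 with
                    | none => 0 | some s => PySem.Str.len s
          if PySem.Int.mod num 100 == 0 then
            hd + PySem.Str.len hundred
          else
            match PySem.Int.ofChars? (PySem.List.slice (PySem.Int.toChars num) (some 1) none) with
            | none => 0  -- ValueError
            | some r => hd + PySem.Str.len hundred + 3 + lengthOfNumberFuel f r
      else if num == 1000 then PySem.Str.len thousand
      else 0  -- Python returns None here (num > 1000)

def lengthOfNumber (num : Int) : Int := lengthOfNumberFuel 2 num

-- ===== PORT B =====
def onesAlt : List (List Char) :=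
  (["", "one", "two", "three", "four", "five", "six", "seven", "eight", "nine", "ten", "eleven", "twelve", "thirteen", "fourteen", "fifteen", "sixteen", "seventeen", "eighteen", "nineteen"] : List String).map String.toList
def tensAlt : List (List Char) :=
  (["", "", "twenty", "thirty", "forty", "fifty", "sixty", "seventy", "eighty", "ninety"] : List String).map String.toList

-- small(n): English fragment for 0..99 (getD [] stands for the IndexError branch, unreachable from B's callers)
def smallAlt (n : Int) : List Char :=
  if n < 20 then (PySem.List.pyGet? onesAlt n).getD []
  else (PySem.List.pyGet? tensAlt (PySem.Int.floordiv n 10)).getD []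
       ++ (PySem.List.pyGet? onesAlt (PySem.Int.mod n 10)).getD []

def lengthOfNumber_alt (num : Int) : Int :=
  if num < 0 ∨ 1000 < num then 0  -- Python B returns None here; outside Pre_
  else
    let s : List Char :=
      if num == 1000 then "onethousand".toList
      else if 100 ≤ num then
        let h := (PySem.List.pyGet? onesAlt (PySem.Int.floordiv num 100)).getD [] ++ "hundred".toList
        if PySem.Int.mod num 100 ≠ 0 then h ++ "and".toList ++ smallAlt (PySem.Int.mod num 100) else h
      else smallAlt num
    (s.length : Int)

-- ===== PRECONDITION & SPEC =====
-- Pre_ excludes num < 0, where A raises ValueError (int('-')), and num > 1000, where A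
-- falls off the end and returns None, not an int.
def Pre_lengthOfNumber (num : Int) : Prop := 0 ≤ num ∧ num ≤ 1000
instance (num : Int) : Decidable (Pre_lengthOfNumber num) := by unfold Pre_lengthOfNumber; infer_instance
def pvWitness_lengthOfNumber : Int := (342)

def Spec_lengthOfNumber (num : Int) (out : Int) : Prop := out = lengthOfNumber_alt num
instance (num : Int) (out : Int) : Decidable (Spec_lengthOfNumber num out) := by unfold Spec_lengthOfNumber; infer_instance

-- ===== CLAIM (what is proved, stated in full; the proofs are below) =====
def Claim_equal_lengthOfNumber : Prop := ∀ (num : Int), Dom_lengthOfNumber num → Pre_lengthOfNumber num → Spec_lengthOfNumber num (lengthOfNumber num)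

-- ===== LEMMAS AND PROOFS =====
set_option maxHeartbeats 4000000 in
set_option maxRecDepth 10000 in
theorem lengthOfNumber_agree_fin : ∀ n : Fin 1001, lengthOfNumber (n.val : Int) = lengthOfNumber_alt (n.val : Int) := by
  decide

-- ===== VERDICT (by name: the statement is the Claim_ definition above) =====
theorem lengthOfNumber_spec : Claim_equal_lengthOfNumber := by
  intro num _ hpre
  unfold Spec_lengthOfNumber
  obtain ⟨h0, h1⟩ := hpre
  have hne : num = ((num.toNat : Nat) : Int) := by omega
  have hlt : num.toNat < 1001 := by omega
  have := lengthOfNumber_agree_fin ⟨num.toNat, hlt⟩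
  simpa [← hne] using this
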